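-- pv_equiv track=rewrite | github.com/wangyuhuix/toolsm | logger.py | __split_long_filename
-- ===== SOURCE A (Python) =====
-- def __split_long_filename(name):
--     # TODO: split into 2 or 3 dirs
--     symbol_2_cnt = { '()':0, '{}':0 }
--     for _i in range(len(name)-1, -1, -1):
--         s = name[_i]
--         if s == ',':
--             if all( [symbol_2_cnt[symbol] == 0 for symbol in symbol_2_cnt  ] ) and len(name[:_i]) <= 256:
--                 name = f'{name[:_i]}/{name[_i:]}'
--                 break
--         else:
--             for symbol in symbol_2_cnt.keys():
--                 if s == symbol[1]:
--                     symbol_2_cnt[symbol] += 1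
--                 elif s == symbol[0]:
--                     symbol_2_cnt[symbol] -= 1
--     else:
--         raise NotImplementedError('SPLIT path failed')
--
--     return name
-- ===== SOURCE B (Python) =====
-- def __split_long_filename(name):
--     # Single forward pass: a comma at i is a split point iff the running
--     # (close-open) tallies equal the global totals (i.e. its suffix balances)
--     # and i <= 256; keep the last (= rightmost) such i.
--     tp = name.count(')') - name.count('(')
--     tb = name.count('}') - name.count('{')
--     rp = rb = 0
--     best = None
--     for i, s in enumerate(name):
--         if s == ',' and rp == tp and rb == tb and i <= 256:
--             best = i
--         if s == ')':
--             rp += 1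
--         elif s == '(':
--             rp -= 1
--         elif s == '}':
--             rb += 1
--         elif s == '{':
--             rb -= 1
--     if best is None:
--         raise NotImplementedError('SPLIT path failed')
--     return name[:best] + '/' + name[best:]
-- ===== Notes on version B (the rewrite author's own statement) =====
-- stated objective: alternative
-- what changed: Replaces A's right-to-left scan with live parenthesis/brace balance counters and early break by a single forward pass that precomputes global close-minus-open totals, marks a comma as a split point when the running tallies equal the totals (i.e. its suffix balances), and keeps the last qualifying index at most 256.
import Mathlib
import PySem

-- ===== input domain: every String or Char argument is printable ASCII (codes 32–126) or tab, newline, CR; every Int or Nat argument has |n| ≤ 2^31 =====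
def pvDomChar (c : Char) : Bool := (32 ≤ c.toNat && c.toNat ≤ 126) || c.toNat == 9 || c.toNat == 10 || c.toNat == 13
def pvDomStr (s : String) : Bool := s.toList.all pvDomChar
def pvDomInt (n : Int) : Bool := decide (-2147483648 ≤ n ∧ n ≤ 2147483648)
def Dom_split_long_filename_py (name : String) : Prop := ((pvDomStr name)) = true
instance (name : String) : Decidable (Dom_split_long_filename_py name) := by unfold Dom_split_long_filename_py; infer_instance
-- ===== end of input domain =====

-- B replaces A's right-to-left scan with balance counters by one forward pass that
-- compares running close-minus-open tallies against precomputed global totals and keeps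
-- the last qualifying comma index (objective: alternative decomposition, same cost).

-- ===== PORT A =====
-- loop over _i = k-1, k-2, …, 0 (A's 'for _i in range(len(name)-1,-1,-1)');
-- cp/cb are symbol_2_cnt['()'] and symbol_2_cnt['{}']; none = the for-else raise
def split_long_filename_py_loop (name : List Char) : Nat → Int → Int → Option (List Char)
  | 0, _, _ => none
  | k+1, cp, cb =>
    let s := name.getD k ' '
    if s = ',' then
      if cp = 0 ∧ cb = 0 ∧ (name.take k).length ≤ 256 then
        some (name.take k ++ '/' :: name.drop k)
      else split_long_filename_py_loop name k cp cb
    else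
      split_long_filename_py_loop name k
        (if s = ')' then cp + 1 else if s = '(' then cp - 1 else cp)
        (if s = '}' then cb + 1 else if s = '{' then cb - 1 else cb)

def split_long_filename_py (name : String) : String :=
  match split_long_filename_py_loop name.toList name.toList.length 0 0 with
  | some l => String.ofList l
  | none => name   -- unreachable under Pre_: Python raises NotImplementedError here

-- ===== PORT B =====
-- one forward step of Source B's loop body; state = (rp, rb, best)
def pvBStep (tp tb : Int) (st : Int × Int × Option Int) (is : Int × Char) : Int × Int × Option Int :=
  let rp := st.1; let rb := st.2.1; let best := st.2.2
  let i := is.1; let s := is.2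
  let best' := if s = ',' ∧ rp = tp ∧ rb = tb ∧ i ≤ 256 then some i else best
  (if s = ')' then rp + 1 else if s = '(' then rp - 1 else rp,
   if s = '}' then rb + 1 else if s = '{' then rb - 1 else rb,
   best')

def split_long_filename_py_alt (name : String) : String :=
  let cs := name.toList
  let tp : Int := (cs.count ')' : Int) - (cs.count '(' : Int)
  let tb : Int := (cs.count '}' : Int) - (cs.count '{' : Int)
  let st := (PySem.List.enumerate cs 0).foldl (pvBStep tp tb) (0, 0, none)
  match st.2.2 with
  | some i => String.ofList (cs.take i.toNat ++ '/' :: cs.drop i.toNat)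
  | none => name   -- Source B raises NotImplementedError here (outside Pre_)

-- ===== PRECONDITION & SPEC =====
-- Pre_ excludes exactly the inputs on which A raises NotImplementedError (the for-else):
-- there must be a comma at index i ≤ 256 whose suffix has balanced parens and braces.
def Pre_split_long_filename_py (name : String) : Prop :=
  ∃ i ∈ List.range name.toList.length,
    name.toList.getD i ' ' = ',' ∧ i ≤ 256 ∧
    (name.toList.drop (i+1)).count ')' = (name.toList.drop (i+1)).count '(' ∧
    (name.toList.drop (i+1)).count '}' = (name.toList.drop (i+1)).count '{'
instance (name : String) : Decidable (Pre_split_long_filename_py name) := by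
  unfold Pre_split_long_filename_py; infer_instance

def pvWitness_split_long_filename_py : String := "a,b"

def Spec_split_long_filename_py (name : String) (out : String) : Prop := out = split_long_filename_py_alt name
instance (name : String) (out : String) : Decidable (Spec_split_long_filename_py name out) := by unfold Spec_split_long_filename_py; infer_instance

-- ===== CLAIM (what is proved, stated in full; the proofs are below) =====
def Claim_equal_split_long_filename_py : Prop := ∀ (name : String), Dom_split_long_filename_py name → Pre_split_long_filename_py name → Spec_split_long_filename_py name (split_long_filename_py name)

-- ===== LEMMAS AND PROOFS =====

def pvDP (l : List Char) : Int := (l.count ')' : Int) - (l.count '(' : Int)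
def pvDB (l : List Char) : Int := (l.count '}' : Int) - (l.count '{' : Int)

-- i is a split point: comma, i ≤ 256, suffix balanced
def pvGood (l : List Char) (i : Nat) : Bool :=
  (l.getD i ' ' == ',') && (decide (i ≤ 256)) &&
  ((l.drop (i+1)).count ')' == (l.drop (i+1)).count '(') &&
  ((l.drop (i+1)).count '}' == (l.drop (i+1)).count '{')

def pvLastGood (l : List Char) (k : Nat) : Option Nat :=
  ((List.range k).filter (pvGood l)).getLast?

def pvIns (l : List Char) (i : Nat) : List Char := l.take i ++ '/' :: l.drop i

theorem pvLA (l : List Char) : ∀ k, k ≤ l.length →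
    split_long_filename_py_loop l k (pvDP (l.drop k)) (pvDB (l.drop k))
      = (pvLastGood l k).map (pvIns l) := by
  intro k
  induction k with
  | zero => intro _; simp [split_long_filename_py_loop, pvLastGood]
  | succ k ih =>
    intro hk
    have hkl : k < l.length := hk
    have hdrop : l.drop k = l[k] :: l.drop (k+1) := List.drop_eq_getElem_cons hkl
    have hgetD : l.getD k ' ' = l[k] := List.getD_eq_getElem l ' ' hkl
    have hcnt : ∀ c : Char, (l.drop k).count c
        = (l.drop (k+1)).count c + (if l[k] == c then 1 else 0) := by
      intro c; rw [hdrop, List.count_cons]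
    have hrange : pvLastGood l (k+1)
        = if pvGood l k then some k else pvLastGood l k := by
      unfold pvLastGood
      rw [List.range_succ, List.filter_append]
      by_cases h : pvGood l k
      · simp [h]
      · simp [h]
    simp only [split_long_filename_py_loop, hgetD]
    by_cases hc : l[k] = ','
    · rw [if_pos hc]
      have hgood : pvGood l k
          = decide (pvDP (l.drop (k+1)) = 0 ∧ pvDB (l.drop (k+1)) = 0 ∧ (l.take k).length ≤ 256) := by
        have d1 : pvDP (l.drop (k+1)) = 0 ↔ (l.drop (k+1)).count ')' = (l.drop (k+1)).count '(' := by
          unfold pvDP; omega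
        have d2 : pvDB (l.drop (k+1)) = 0 ↔ (l.drop (k+1)).count '}' = (l.drop (k+1)).count '{' := by
          unfold pvDB; omega
        have d3 : (l.take k).length ≤ 256 ↔ k ≤ 256 := by
          rw [List.length_take]; omega
        simp only [pvGood, List.getD_eq_getElem?_getD, List.getElem?_eq_getElem hkl,
          Option.getD_some, hc, d1, d2, d3]
        by_cases h1 : (l.drop (k+1)).count ')' = (l.drop (k+1)).count '(' <;>
          by_cases h2 : (l.drop (k+1)).count '}' = (l.drop (k+1)).count '{' <;>
          by_cases h3 : k ≤ 256 <;>
          simp [h1, h2, h3]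
      by_cases hcond : pvDP (l.drop (k+1)) = 0 ∧ pvDB (l.drop (k+1)) = 0 ∧ (l.take k).length ≤ 256
      · rw [if_pos hcond, hrange]
        have hgt : pvGood l k = true := by rw [hgood]; exact decide_eq_true hcond
        simp [hgt, pvIns]
      · rw [if_neg hcond, hrange]
        have hg : pvGood l k = false := by rw [hgood]; exact decide_eq_false hcond
        rw [hg]
        simp only [Bool.false_eq_true, if_false]
        have hP : pvDP (l.drop (k+1)) = pvDP (l.drop k) := by
          unfold pvDP; rw [hcnt ')', hcnt '(']; simp [hc]
        have hB : pvDB (l.drop (k+1)) = pvDB (l.drop k) := by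
          unfold pvDB; rw [hcnt '}', hcnt '{']; simp [hc]
        rw [hP, hB]; exact ih (le_of_lt hkl)
    · have hg : pvGood l k = false := by
        simp [pvGood, List.getD_eq_getElem?_getD, List.getElem?_eq_getElem hkl, hc]
      rw [if_neg hc, hrange, hg]
      simp only [Bool.false_eq_true, if_false]
      have hP' : (if l[k] = ')' then pvDP (l.drop (k+1)) + 1
          else if l[k] = '(' then pvDP (l.drop (k+1)) - 1 else pvDP (l.drop (k+1)))
          = pvDP (l.drop k) := by
        have c1 := hcnt ')'
        have c2 := hcnt '('
        by_cases h1 : l[k] = ')' <;> by_cases h2 : l[k] = '(' <;>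
          simp [h1, h2] at c1 c2 ⊢ <;> unfold pvDP <;> omega
      have hB' : (if l[k] = '}' then pvDB (l.drop (k+1)) + 1
          else if l[k] = '{' then pvDB (l.drop (k+1)) - 1 else pvDB (l.drop (k+1)))
          = pvDB (l.drop k) := by
        have c1 := hcnt '}'
        have c2 := hcnt '{'
        by_cases h1 : l[k] = '}' <;> by_cases h2 : l[k] = '{' <;>
          simp [h1, h2] at c1 c2 ⊢ <;> unfold pvDB <;> omega
      rw [hP', hB']; exact ih (le_of_lt hkl)

theorem pvLB (l : List Char) : ∀ (suf pre : List Char) (b0 : Option Int), l = pre ++ suf →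
    ((PySem.List.enumerate suf (pre.length : Int)).foldl (pvBStep (pvDP l) (pvDB l))
        (pvDP pre, pvDB pre, b0)).2.2
      = match ((List.range' pre.length suf.length).filter (pvGood l)).getLast? with
        | some i => some (i : Int) | none => b0 := by
  intro suf
  induction suf with
  | nil => intro pre b0 hl; simp [PySem.List.enumerate, List.range'_zero]
  | cons s rest ih =>
    intro pre b0 hl
    have hdropl : l.drop pre.length = s :: rest := by rw [hl]; exact List.drop_left ..
    have hlen : pre.length < l.length := by rw [hl]; simp
    have hget : l[pre.length]'hlen = s := by
      have := List.drop_eq_getElem_cons hlen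
      rw [hdropl] at this
      exact (List.cons.injEq .. ▸ this).1.symm
    have hrest : l.drop (pre.length + 1) = rest := by
      have := List.drop_eq_getElem_cons hlen
      rw [hdropl] at this
      exact ((List.cons.injEq .. ▸ this).2).symm
    have hcntl : ∀ c : Char, (l.count c : Int) = (pre.count c : Int) + (if s == c then 1 else 0) + (rest.count c : Int) := by
      intro c; rw [hl]; simp [List.count_append, List.count_cons]; omega
    rw [PySem.List.enumerate_cons, List.foldl_cons]
    have hstep : pvBStep (pvDP l) (pvDB l) (pvDP pre, pvDB pre, b0) ((pre.length : Int), s)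
        = (pvDP (pre ++ [s]), pvDB (pre ++ [s]),
           if pvGood l pre.length then some (pre.length : Int) else b0) := by
      unfold pvBStep
      refine Prod.ext ?_ (Prod.ext ?_ ?_)
      · have c1 := hcntl ')'
        have c2 := hcntl '('
        by_cases h1 : s = ')' <;> by_cases h2 : s = '(' <;>
          simp [h1, h2, pvDP, List.count_append] <;> omega
      · have c1 := hcntl '}'
        have c2 := hcntl '{'
        by_cases h1 : s = '}' <;> by_cases h2 : s = '{' <;>
          simp [h1, h2, pvDB, List.count_append] <;> omega
      · simp only
        have hiff : (s = ',' ∧ pvDP pre = pvDP l ∧ pvDB pre = pvDB l ∧ (pre.length : Int) ≤ 256)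
            ↔ pvGood l pre.length = true := by
          simp only [pvGood, List.getD_eq_getElem?_getD, List.getElem?_eq_getElem hlen,
            Option.getD_some, hget, hrest, Bool.and_eq_true, beq_iff_eq, decide_eq_true_eq,
            and_assoc]
          constructor
          · rintro ⟨h1, h2, h3, h4⟩
            have c1 := hcntl ')'
            have c2 := hcntl '('
            have c3 := hcntl '}'
            have c4 := hcntl '{'
            simp [h1] at c1 c2 c3 c4
            unfold pvDP at h2; unfold pvDB at h3
            refine ⟨h1, by omega, by omega, by omega⟩
          · rintro ⟨h1, h4, h2, h3⟩
            have c1 := hcntl ')'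
            have c2 := hcntl '('
            have c3 := hcntl '}'
            have c4 := hcntl '{'
            simp [h1] at c1 c2 c3 c4
            unfold pvDP pvDB
            refine ⟨h1, by omega, by omega, by omega⟩
        exact if_congr hiff rfl rfl
    rw [hstep]
    have ih' := ih (pre ++ [s])
      (if pvGood l pre.length then some (pre.length : Int) else b0)
      (by rw [hl, List.append_assoc]; rfl)
    have hlen2 : (pre ++ [s]).length = pre.length + 1 := by simp
    rw [hlen2] at ih'
    have hcast : ((pre.length + 1 : Nat) : Int) = (pre.length : Int) + 1 := by push_cast; ring
    rw [hcast] at ih'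
    rw [ih']
    have hr : List.range' pre.length (s :: rest).length
        = pre.length :: List.range' (pre.length + 1) rest.length := by
      simp [List.range'_succ]
    rw [hr, List.filter_cons]
    by_cases hg : pvGood l pre.length
    · rw [if_pos hg]
      cases hF : (List.range' (pre.length + 1) rest.length).filter (pvGood l) with
      | nil => simp [hg]
      | cons f fs =>
        cases h2 : (f :: fs).getLast? with
        | none => exact absurd (List.getLast?_eq_none_iff.mp h2) (List.cons_ne_nil f fs)
        | some x => rw [if_pos hg, List.getLast?_cons_cons, h2]
    · rw [if_neg hg]
      cases hF : (List.range' (pre.length + 1) rest.length).filter (pvGood l) with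
      | nil => simp [hg]
      | cons f fs => simp [hg]

-- ===== VERDICT (by name: the statement is the Claim_ definition above) =====
theorem split_long_filename_py_spec : Claim_equal_split_long_filename_py := by
  unfold Claim_equal_split_long_filename_py
  intro name _ _
  unfold Spec_split_long_filename_py
  have h0P : pvDP [] = 0 := by simp [pvDP]
  have h0B : pvDB [] = 0 := by simp [pvDB]
  have hA := pvLA name.toList name.toList.length le_rfl
  rw [List.drop_length, h0P, h0B] at hA
  have hB := pvLB name.toList name.toList [] none (by simp)
  rw [h0P, h0B] at hB
  simp only [List.length_nil, Nat.cast_zero, ← List.range_eq_range'] at hB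
  have hAport : split_long_filename_py name
      = match (pvLastGood name.toList name.toList.length).map (pvIns name.toList) with
        | some L => String.ofList L | none => name := by
    unfold split_long_filename_py; rw [hA]
  have hBport : split_long_filename_py_alt name
      = match (pvLastGood name.toList name.toList.length).map (pvIns name.toList) with
        | some L => String.ofList L | none => name := by
    unfold split_long_filename_py_alt
    simp only
    rw [show ((name.toList.count ')' : Int) - (name.toList.count '(' : Int)) = pvDP name.toList from rfl,
        show ((name.toList.count '}' : Int) - (name.toList.count '{' : Int)) = pvDB name.toList from rfl,
        hB]
    rw [show (List.filter (pvGood name.toList) (List.range name.toList.length)).getLast?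
        = pvLastGood name.toList name.toList.length from rfl]
    cases pvLastGood name.toList name.toList.length with
    | none => rfl
    | some i => simp [pvIns, Int.toNat_natCast]
  rw [hAport, hBport]
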